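-- pv_equiv track=rewrite | github.com/1688168/Codes | LC/[2519] Count the Number of K-Big Indices - binary search.py | kBigIndices
-- ===== SOURCE A (Python) =====
-- from typing import List
--
-- from bisect import bisect_left
--
-- def kBigIndices(nums: List[int], k: int) -> int:
--     def helper(nums):
--         N = len(nums)
--         res = [False]*N
--         insert = []
--         for ii, vv in enumerate(nums):
--             idx = bisect_left(insert, vv)
--             if idx >= k:
--                 res[ii] = True
--
--             insert.insert(idx, vv)
--
--         return res
--
--     left = helper(nums)
--     right = helper(nums[::-1])[::-1]
--
--     # return sum([int(left[ii] and right[ii]) for ii in range(len(nums))])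
--     return sum(a & b for a, b in zip(left, right))
-- ===== SOURCE B (Python) =====
-- def kBigIndices(nums, k):
--     # One direct pass: for each element count the strictly smaller elements
--     # in the prefix and in the suffix, instead of maintaining sorted lists.
--     total = 0
--     pre = []
--     rest = list(nums)
--     while rest:
--         v = rest.pop(0)
--         if sum(x < v for x in pre) >= k and sum(x < v for x in rest) >= k:
--             total += 1
--         pre.append(v)
--     return total
-- ===== Notes on version B (the rewrite author's own statement) =====
-- stated objective: simpler
-- what changed: Replaces the two bisect/insort passes (building sorted prefix lists and a reversed second pass) with one direct pass that, for each index, counts the strictly smaller elements in its prefix and in its suffix.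
import Mathlib
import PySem

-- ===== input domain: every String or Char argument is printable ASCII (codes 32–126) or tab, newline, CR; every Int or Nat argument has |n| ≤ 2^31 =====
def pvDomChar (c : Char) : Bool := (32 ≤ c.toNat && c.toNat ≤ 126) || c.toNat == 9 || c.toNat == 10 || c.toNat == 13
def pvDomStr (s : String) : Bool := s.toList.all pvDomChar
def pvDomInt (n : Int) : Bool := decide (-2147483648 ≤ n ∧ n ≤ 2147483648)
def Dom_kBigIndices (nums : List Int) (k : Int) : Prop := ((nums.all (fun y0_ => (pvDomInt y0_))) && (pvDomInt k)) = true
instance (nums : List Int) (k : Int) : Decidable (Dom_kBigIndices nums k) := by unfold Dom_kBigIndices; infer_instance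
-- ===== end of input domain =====

-- B replaces A's two bisect/insort passes over incrementally maintained sorted lists
-- with one direct pass counting, per index, the smaller elements in prefix and suffix
-- (objective: simpler; both programs are quadratic).

-- ===== PORT A =====
-- one step of helper's loop: state = (res, insert); p = (ii, vv) from enumerate
def helperStep (k : Int) (st : List Bool × List Int) (p : Int × Int) : List Bool × List Int :=
  let idx := PySem.List.bisectLeft st.2 p.2          -- idx = bisect_left(insert, vv)
  ((if (idx : Int) ≥ k then st.1.set p.1.toNat true else st.1),  -- if idx >= k: res[ii] = True
   PySem.List.insert st.2 (idx : Int) p.2)           -- insert.insert(idx, vv)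

-- helper(nums): res = [False]*N; for ii, vv in enumerate(nums): …; return res
def helperA (k : Int) (nums : List Int) : List Bool :=
  ((PySem.List.enumerate nums 0).foldl (helperStep k) (List.replicate nums.length false, [])).1

def kBigIndices (nums : List Int) (k : Int) : Int :=
  let left := helperA k nums
  let right := (helperA k nums.reverse).reverse      -- nums[::-1] and [::-1] are List.reverse
  -- sum(a & b for a, b in zip(left, right))
  (left.zip right).foldl (fun acc p => acc + (if p.1 && p.2 then (1 : Int) else 0)) 0

-- ===== PORT B =====
-- the while loop of Source B: state = (pre, rest); v = rest.pop(0); … ; pre.append(v)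
def altGo (k : Int) (pre rest : List Int) : Int :=
  match rest with
  | [] => 0
  | v :: tl =>
    (if ((pre.countP (fun x => x < v) : Int) ≥ k ∧ (tl.countP (fun x => x < v) : Int) ≥ k)
     then (1 : Int) else (0 : Int)) + altGo k (pre ++ [v]) tl

def kBigIndices_alt (nums : List Int) (k : Int) : Int := altGo k [] nums

-- ===== PRECONDITION & SPEC =====
def Spec_kBigIndices (nums : List Int) (k : Int) (out : Int) : Prop := out = kBigIndices_alt nums k
instance (nums : List Int) (k : Int) (out : Int) : Decidable (Spec_kBigIndices nums k out) := by unfold Spec_kBigIndices; infer_instance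

-- ===== CLAIM (what is proved, stated in full; the proofs are below) =====
def Claim_equal_kBigIndices : Prop := ∀ (nums : List Int) (k : Int), Dom_kBigIndices nums k → Spec_kBigIndices nums k (kBigIndices nums k)

-- ===== LEMMAS AND PROOFS =====

-- on a sorted list, bisect_left returns the number of strictly smaller elements
theorem bisectLeft_eq_countP (xs : List Int) (x : Int)
    (hs : xs.Pairwise (fun a b => a ≤ b)) :
    PySem.List.bisectLeft xs x = xs.countP (fun y => y < x) := by
  obtain ⟨hle, hlt, hge⟩ := PySem.List.bisectLeft_spec xs x hs
  set c := PySem.List.bisectLeft xs x with hc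
  have h1 : (xs.take c).countP (fun y => decide (y < x)) = c := by
    rw [List.countP_eq_length.mpr, List.length_take]
    · omega
    · intro a ha
      obtain ⟨j, hj, rfl⟩ := List.mem_iff_getElem.mp ha
      have hj' : j < xs.length := by have := List.length_take_le c xs; omega
      rw [List.getElem_take]
      have hjc : j < c := by simp [List.length_take] at hj; omega
      simpa using hlt j hj' hjc
  have h2 : (xs.drop c).countP (fun y => decide (y < x)) = 0 := by
    rw [List.countP_eq_zero]
    intro a ha
    obtain ⟨j, hj, rfl⟩ := List.mem_iff_getElem.mp ha
    rw [List.getElem_drop]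
    have hj' : c + j < xs.length := by simp [List.length_drop] at hj; omega
    have := hge (c + j) hj' (by omega)
    simp only [decide_eq_true_eq]
    omega
  calc c = (xs.take c).countP (fun y => decide (y < x)) + (xs.drop c).countP (fun y => decide (y < x)) := by omega
    _ = xs.countP (fun y => y < x) := by rw [← List.countP_append, List.take_append_drop]

-- inserting at the bisect_left position keeps the list sorted, and adds the element
theorem insertStep_sorted_perm (s : List Int) (v : Int)
    (hs : s.Pairwise (fun a b => a ≤ b)) :
    (PySem.List.insert s ((PySem.List.bisectLeft s v : Nat) : Int) v).Pairwise (fun a b => a ≤ b) ∧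
    (PySem.List.insert s ((PySem.List.bisectLeft s v : Nat) : Int) v).Perm (v :: s) := by
  obtain ⟨hle, hlt, hge⟩ := PySem.List.bisectLeft_spec s v hs
  set c := PySem.List.bisectLeft s v with hc
  rw [PySem.List.insert_natCast s c v hle]
  constructor
  · rw [List.pairwise_append]
    refine ⟨hs.sublist (List.take_sublist c s), ?_, ?_⟩
    · rw [List.pairwise_cons]
      refine ⟨?_, hs.sublist (List.drop_sublist c s)⟩
      intro b hb
      obtain ⟨j, hj, rfl⟩ := List.mem_iff_getElem.mp hb
      rw [List.getElem_drop]
      have hj' : c + j < s.length := by simp [List.length_drop] at hj; omega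
      exact hge (c + j) hj' (by omega)
    · intro a ha b hb
      obtain ⟨j, hj, rfl⟩ := List.mem_iff_getElem.mp ha
      have hj' : j < s.length := by have := List.length_take_le c s; omega
      rw [List.getElem_take]
      have hjc : j < c := by simp [List.length_take] at hj; omega
      have hav := hlt j hj' hjc
      rcases List.mem_cons.mp hb with rfl | hb'
      · omega
      · obtain ⟨i, hi, rfl⟩ := List.mem_iff_getElem.mp hb'
        rw [List.getElem_drop]
        have hi' : c + i < s.length := by simp [List.length_drop] at hi; omega
        have := hge (c + i) hi' (by omega)
        omega
  · calc (s.take c ++ v :: s.drop c).Perm (v :: (s.take c ++ s.drop c)) := List.perm_middle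
      _ = (v :: s) := by rw [List.take_append_drop]

-- the insertion list after folding the values of l onto a sorted s0
def insList (s0 : List Int) (l : List Int) : List Int :=
  l.foldl (fun s v => PySem.List.insert s ((PySem.List.bisectLeft s v : Nat) : Int) v) s0

theorem insList_sorted_perm (l : List Int) (s0 : List Int)
    (hs : s0.Pairwise (fun a b => a ≤ b)) :
    (insList s0 l).Pairwise (fun a b => a ≤ b) ∧ (insList s0 l).Perm (s0 ++ l) := by
  induction l generalizing s0 with
  | nil => simpa [insList] using hs
  | cons v tl ih =>
    obtain ⟨h1, h2⟩ := insertStep_sorted_perm s0 v hs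
    obtain ⟨ih1, ih2⟩ := ih _ h1
    have hunf : insList s0 (v :: tl) = insList (PySem.List.insert s0 ((PySem.List.bisectLeft s0 v : Nat) : Int) v) tl := rfl
    refine ⟨by rw [hunf]; exact ih1, ?_⟩
    rw [hunf]
    exact ih2.trans ((h2.append_right tl).trans List.perm_middle.symm)

theorem foldl_helperStep_snd (k : Int) (l : List Int) (r : List Bool) (s0 : List Int) (s : Int) :
    ((PySem.List.enumerate l s).foldl (helperStep k) (r, s0)).2 = insList s0 l := by
  induction l generalizing r s0 s with
  | nil => simp [PySem.List.enumerate_nil, insList]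
  | cons v tl ih =>
    rw [PySem.List.enumerate_cons]
    simp only [List.foldl_cons]
    exact ih _ _ _

theorem foldl_helperStep_fst_length (k : Int) (ps : List (Int × Int)) (r : List Bool) (s0 : List Int) :
    (ps.foldl (helperStep k) (r, s0)).1.length = r.length := by
  induction ps generalizing r s0 with
  | nil => rfl
  | cons p tl ih =>
    simp only [List.foldl_cons]
    rw [ih]
    simp only [helperStep]
    split <;> simp

theorem foldl_helperStep_pad (k : Int) (ps : List (Int × Int)) (r t : List Bool) (s0 : List Int)
    (h : ∀ p ∈ ps, 0 ≤ p.1 ∧ p.1.toNat < r.length) :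
    ps.foldl (helperStep k) (r ++ t, s0) =
      ((ps.foldl (helperStep k) (r, s0)).1 ++ t, (ps.foldl (helperStep k) (r, s0)).2) := by
  induction ps generalizing r s0 with
  | nil => rfl
  | cons p tl ih =>
    simp only [List.foldl_cons]
    have hp := h p (List.mem_cons_self ..)
    have hstep : helperStep k (r ++ t, s0) p =
        ((helperStep k (r, s0) p).1 ++ t, (helperStep k (r, s0) p).2) := by
      simp only [helperStep]
      split
      · rw [List.set_append_left _ _ hp.2]
      · rfl
    rw [hstep]
    have hlen : (helperStep k (r, s0) p).1.length = r.length := by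
      simp only [helperStep]; split <;> simp
    exact ih _ _ (fun q hq => by rw [hlen]; exact h q (List.mem_cons_of_mem _ hq))

theorem helperA_append (k : Int) (l : List Int) (v : Int) :
    helperA k (l ++ [v]) = helperA k l ++ [decide (((l.countP (fun x => x < v) : Int)) ≥ k)] := by
  have hlen : (l ++ [v]).length = l.length + 1 := by simp
  have henum : PySem.List.enumerate (l ++ [v]) 0 =
      PySem.List.enumerate l 0 ++ [((l.length : Int), v)] := by
    rw [PySem.List.enumerate_append]
    simp [PySem.List.enumerate_cons, PySem.List.enumerate_nil]
  have hrep : List.replicate (l ++ [v]).length false =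
      List.replicate l.length false ++ [false] := by
    rw [hlen, List.replicate_succ']
  have hcond : ∀ p ∈ PySem.List.enumerate l 0, 0 ≤ p.1 ∧ p.1.toNat < (List.replicate l.length false).length := by
    intro p hp
    obtain ⟨j, hj, rfl⟩ := (PySem.List.mem_enumerate_iff l 0 p).mp hp
    simp
    omega
  unfold helperA
  rw [henum, hrep, List.foldl_append,
      foldl_helperStep_pad k _ _ _ _ hcond]
  simp only [List.foldl_cons, List.foldl_nil]
  set F := ((PySem.List.enumerate l 0).foldl (helperStep k) (List.replicate l.length false, [])).1 with hF
  have hFlen : F.length = l.length := by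
    rw [hF, foldl_helperStep_fst_length]; simp
  have hS : ((PySem.List.enumerate l 0).foldl (helperStep k) (List.replicate l.length false, [])).2 = insList [] l :=
    foldl_helperStep_snd k l _ _ _
  rw [hS]
  obtain ⟨hsort, hperm⟩ := insList_sorted_perm l [] (List.Pairwise.nil)
  have hbl : PySem.List.bisectLeft (insList [] l) v = l.countP (fun x => x < v) := by
    rw [bisectLeft_eq_countP _ _ hsort]
    exact hperm.countP_eq _ |>.trans (by simp)
  simp only [helperStep, hbl]
  have hset : (F ++ [false]).set l.length true = F ++ [true] := by
    rw [← hFlen, List.set_append_right _ _ (le_refl _)]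
    simp
  by_cases hk : ((l.countP (fun x => x < v) : Int)) ≥ k
  · simp [hk, hset]
  · simp [hk]

theorem helperA_eq_map (k : Int) (l : List Int) :
    helperA k l = (List.range l.length).map
      (fun i => decide ((((l.take i).countP (fun x => x < l.getD i 0) : Int)) ≥ k)) := by
  induction l using List.reverseRecOn with
  | nil => simp [helperA, PySem.List.enumerate_nil]
  | append_singleton l v ih =>
    rw [helperA_append, ih]
    have hlen : (l ++ [v]).length = l.length + 1 := by simp
    rw [hlen, List.range_succ, List.map_append]
    congr 1
    · apply List.map_congr_left
      intro i hi
      have hi' : i < l.length := List.mem_range.mp hi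
      rw [List.take_append_of_le_length (by omega), List.getD_append _ _ _ _ hi']
    · have h1 : (l ++ [v]).take l.length = l := List.take_left ..
      simp [h1]

theorem altGo_eq (k : Int) (rest : List Int) (pre : List Int) :
    altGo k pre rest = ((List.range rest.length).map
      (fun i => if (((pre ++ rest.take i).countP (fun x => x < rest.getD i 0) : Int)) ≥ k ∧
                   (((rest.drop (i+1)).countP (fun x => x < rest.getD i 0) : Int)) ≥ k
                then (1 : Int) else 0)).sum := by
  induction rest generalizing pre with
  | nil => simp [altGo]
  | cons v tl ih =>
    rw [altGo, ih (pre ++ [v])]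
    simp only [List.length_cons, List.range_succ_eq_map, List.map_cons, List.sum_cons,
      List.map_map]
    congr 1
    · simp
    · congr 1
      apply List.map_congr_left
      intro i hi
      simp only [Function.comp, List.take_succ_cons, List.getD_cons_succ, List.drop_succ_cons,
        List.append_assoc, List.singleton_append]

-- the reversed second pass of A computes the suffix counts
theorem helperA_reverse (k : Int) (nums : List Int) :
    (helperA k nums.reverse).reverse = (List.range nums.length).map
      (fun i => decide ((((nums.drop (i+1)).countP (fun x => x < nums.getD i 0) : Int)) ≥ k)) := by
  rw [helperA_eq_map]
  apply List.ext_getElem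
  · simp
  · intro i hi1 hi2
    have hn : nums.reverse.length = nums.length := by simp
    have hi : i < nums.length := by simpa using hi2
    rw [List.getElem_reverse]
    simp only [List.getElem_map, List.getElem_range, List.length_map, List.length_range,
      List.length_reverse]
    have hgd : nums.reverse.getD (nums.length - 1 - i) 0 = nums.getD i 0 := by
      rw [List.getD_eq_getElem _ _ (by simp; omega), List.getD_eq_getElem _ _ hi,
          List.getElem_reverse]
      congr 1
      omega
    have htk : nums.reverse.take (nums.length - 1 - i) = (nums.drop (i+1)).reverse := by
      rw [List.take_reverse]
      have h2 : nums.length - (nums.length - 1 - i) = i + 1 := by omega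
      rw [h2]
    rw [hgd, htk, List.countP_reverse]

-- ===== VERDICT (by name: the statement is the Claim_ definition above) =====
theorem kBigIndices_spec : Claim_equal_kBigIndices := by
  intro nums k _
  unfold Spec_kBigIndices kBigIndices kBigIndices_alt
  rw [helperA_eq_map, helperA_reverse, altGo_eq]
  simp only [List.nil_append]
  rw [List.zip_map']
  rw [List.foldl_map]
  rw [PySem.List.foldl_add _ (fun i => if (decide ((((nums.take i).countP (fun x => x < nums.getD i 0) : Int)) ≥ k)) &&
        (decide ((((nums.drop (i+1)).countP (fun x => x < nums.getD i 0) : Int)) ≥ k)) then (1:Int) else 0) 0]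
  rw [zero_add]
  congr 1
  apply List.map_congr_left
  intro i hi
  simp
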